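-- pv_equiv track=rewrite | github.com/DIYer22/calibrating | calibrating/camera.py | get_key_idx
-- ===== SOURCE A (Python) =====
-- def get_key_idx(paths):
--     if len(paths) <= 1:
--         return -3, None
--     left_idx = 0
--     while all([paths[0][left_idx] == path[left_idx] for path in paths]):
--         left_idx += 1
--     right_idx = -1
--     while all([paths[0][right_idx] == path[right_idx] for path in paths]):
--         right_idx -= 1
--     return left_idx, right_idx + 1
-- ===== SOURCE B (Python) =====
-- def _lcp(a, b):
--     n = 0
--     for x, y in zip(a, b):
--         if x != y:
--             break
--         n += 1
--     return n
--
--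
-- def get_key_idx(paths):
--     if len(paths) <= 1:
--         return -3, None
--     first = paths[0]
--     left = len(first)
--     right = len(first)
--     for p in paths[1:]:
--         left = min(left, _lcp(first, p))
--         right = min(right, _lcp(first[::-1], p[::-1]))
--     return left, -right
-- ===== Notes on version B (the rewrite author's own statement) =====
-- stated objective: alternative
-- what changed: A scans index-by-index with while-loops probing every path at each index (and raises IndexError when some path is a common prefix/suffix of all); B makes one pass over the paths, maintaining the running minimum of per-path longest-common-prefix lengths (computed by zipping) for the string and its reversal, and is total.
import Mathlib
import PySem

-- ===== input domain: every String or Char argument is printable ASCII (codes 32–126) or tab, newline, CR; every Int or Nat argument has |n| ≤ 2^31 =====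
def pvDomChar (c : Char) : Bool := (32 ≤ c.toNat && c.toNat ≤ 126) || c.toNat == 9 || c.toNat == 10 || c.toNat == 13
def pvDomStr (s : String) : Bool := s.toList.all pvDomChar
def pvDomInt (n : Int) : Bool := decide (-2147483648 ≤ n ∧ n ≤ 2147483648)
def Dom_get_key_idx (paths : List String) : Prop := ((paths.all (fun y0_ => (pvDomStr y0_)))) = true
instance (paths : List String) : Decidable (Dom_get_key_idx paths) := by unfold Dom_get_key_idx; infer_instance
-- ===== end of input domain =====

-- B replaces A's index-by-index while-loops (probing every path at each index) by a single
-- pass over the paths keeping the running minimum of per-path common-prefix/-suffix lengths.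

-- ===== PORT A =====
-- all([paths[0][i] == path[i] for path in paths]): none = IndexError somewhere in the comprehension
def pvCmpAll (p0 : String) (paths : List String) (i : Int) : Option Bool :=
  match paths with
  | [] => some true
  | p :: rest =>
    match PySem.Str.pyGet? p0 i, PySem.Str.pyGet? p i, pvCmpAll p0 rest i with
    | some a, some b, some r => some ((a == b) && r)
    | _, _, _ => none

-- while all([...]): left_idx += 1   (fuel len(paths[0])+1 suffices: the condition raises once
-- the index reaches the end of paths[0], so at most len(paths[0])+1 condition checks happen)
def pvLeftA (p0 : String) (paths : List String) : Nat → Int → Option Int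
  | 0, _ => none
  | fuel+1, i =>
    match pvCmpAll p0 paths i with
    | none => none
    | some true => pvLeftA p0 paths fuel (i+1)
    | some false => some i

-- while all([...]): right_idx -= 1
def pvRightA (p0 : String) (paths : List String) : Nat → Int → Option Int
  | 0, _ => none
  | fuel+1, i =>
    match pvCmpAll p0 paths i with
    | none => none
    | some true => pvRightA p0 paths fuel (i-1)
    | some false => some i

def get_key_idx (paths : List String) : Int × Option Int :=
  if paths.length ≤ 1 then (-3, none)
  else
    let p0 := paths.headD ""
    match pvLeftA p0 paths (p0.toList.length + 1) 0 with
    | none => (0, none)   -- IndexError (outside Pre_)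
    | some l =>
      match pvRightA p0 paths (p0.toList.length + 1) (-1) with
      | none => (0, none) -- IndexError (outside Pre_)
      | some r => (l, some (r + 1))

-- ===== PORT B =====
-- _lcp: count equal leading pairs of zip(a, b)
def pvLcp : List Char → List Char → Int
  | a :: as, b :: bs => if a == b then 1 + pvLcp as bs else 0
  | _, _ => 0

def get_key_idx_alt (paths : List String) : Int × Option Int :=
  if paths.length ≤ 1 then (-3, none)
  else
    let first := paths.headD ""
    let lr := paths.tail.foldl
      (fun (lr : Int × Int) p =>
        (min lr.1 (pvLcp first.toList p.toList),
         min lr.2 (pvLcp first.toList.reverse p.toList.reverse)))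
      (PySem.Str.len first, PySem.Str.len first)
    (lr.1, some (-lr.2))

-- ===== PRECONDITION & SPEC =====
-- Pre_ excludes exactly the inputs on which A raises IndexError: more than one path and some
-- path being a common prefix (resp. common suffix) of all paths makes the comprehension index
-- past that path's end.
def Pre_get_key_idx (paths : List String) : Prop :=
  paths.length ≤ 1 ∨
    ((¬ ∃ p ∈ paths, ∀ q ∈ paths, p.toList.isPrefixOf q.toList = true) ∧
     (¬ ∃ p ∈ paths, ∀ q ∈ paths, p.toList.isSuffixOf q.toList = true))
instance (paths : List String) : Decidable (Pre_get_key_idx paths) := by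
  unfold Pre_get_key_idx; infer_instance

def pvWitness_get_key_idx : List String := ["ab/c", "ad/c"]

def Spec_get_key_idx (paths : List String) (out : Int × Option Int) : Prop :=
  out = get_key_idx_alt paths
instance (paths : List String) (out : Int × Option Int) : Decidable (Spec_get_key_idx paths out) := by
  unfold Spec_get_key_idx; infer_instance

-- ===== CLAIM (what is proved, stated in full; the proofs are below) =====
def Claim_equal_get_key_idx : Prop :=
  ∀ (paths : List String), Dom_get_key_idx paths → Pre_get_key_idx paths →
    Spec_get_key_idx paths (get_key_idx paths)

-- ===== LEMMAS AND PROOFS =====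

-- Nat version of pvLcp, for the proofs
def pvLcpN : List Char → List Char → Nat
  | a :: as, b :: bs => if a = b then 1 + pvLcpN as bs else 0
  | _, _ => 0

theorem pvLcp_eq_cast (a b : List Char) : pvLcp a b = (pvLcpN a b : Int) := by
  induction a generalizing b with
  | nil => cases b <;> simp [pvLcp, pvLcpN]
  | cons x as ih =>
    cases b with
    | nil => simp [pvLcp, pvLcpN]
    | cons y bs =>
      by_cases h : x = y <;> simp [pvLcp, pvLcpN, h, ih]

theorem pvLcpN_self (a : List Char) : pvLcpN a a = a.length := by
  induction a with
  | nil => simp [pvLcpN]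
  | cons x as ih => simp [pvLcpN, ih, Nat.add_comm]

theorem pvLcpN_le_left (a b : List Char) : pvLcpN a b ≤ a.length := by
  induction a generalizing b with
  | nil => cases b <;> simp [pvLcpN]
  | cons x as ih =>
    cases b with
    | nil => simp [pvLcpN]
    | cons y bs =>
      by_cases h : x = y <;> simp [pvLcpN, h]
      · have := ih bs; omega

theorem pvLcpN_le_right (a b : List Char) : pvLcpN a b ≤ b.length := by
  induction a generalizing b with
  | nil => cases b <;> simp [pvLcpN]
  | cons x as ih =>
    cases b with
    | nil => simp [pvLcpN]
    | cons y bs =>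
      by_cases h : x = y <;> simp [pvLcpN, h]
      · have := ih bs; omega

theorem pvLcpN_lt (a b : List Char) (j : Nat) (h : j < pvLcpN a b) :
    ∃ c, a[j]? = some c ∧ b[j]? = some c := by
  induction a generalizing b j with
  | nil => cases b <;> simp [pvLcpN] at h
  | cons x as ih =>
    cases b with
    | nil => simp [pvLcpN] at h
    | cons y bs =>
      by_cases hxy : x = y
      · subst hxy
        cases j with
        | zero => exact ⟨x, by simp, by simp⟩
        | succ j' =>
          simp [pvLcpN] at h
          obtain ⟨c, h1, h2⟩ := ih bs j' (by omega)
          exact ⟨c, by simpa using h1, by simpa using h2⟩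
      · simp [pvLcpN, hxy] at h

theorem pvLcpN_take (a b : List Char) (n : Nat) (h : n ≤ pvLcpN a b) :
    a.take n = b.take n := by
  induction a generalizing b n with
  | nil => cases b <;> simp [pvLcpN] at h <;> simp [h]
  | cons x as ih =>
    cases b with
    | nil => simp [pvLcpN] at h; simp [h]
    | cons y bs =>
      by_cases hxy : x = y
      · subst hxy
        cases n with
        | zero => simp
        | succ n' =>
          simp [pvLcpN] at h
          simp [List.take_succ_cons, ih bs n' (by omega)]
      · simp [pvLcpN, hxy] at h; simp [h]

theorem pvLcpN_ne (a b : List Char) (ha : pvLcpN a b < a.length)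
    (hb : pvLcpN a b < b.length) :
    ∃ c d, a[pvLcpN a b]? = some c ∧ b[pvLcpN a b]? = some d ∧ c ≠ d := by
  induction a generalizing b with
  | nil => simp at ha
  | cons x as ih =>
    cases b with
    | nil => simp at hb
    | cons y bs =>
      by_cases hxy : x = y
      · subst hxy
        have ha' : pvLcpN as bs < as.length := by simp [pvLcpN] at ha; omega
        have hb' : pvLcpN as bs < bs.length := by simp [pvLcpN] at hb; omega
        obtain ⟨c, d, h1, h2, h3⟩ := ih bs ha' hb'
        refine ⟨c, d, ?_, ?_, h3⟩ <;>
          simp [pvLcpN, Nat.add_comm 1 (pvLcpN as bs), h1, h2]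
      · exact ⟨x, y, by simp [pvLcpN, hxy], by simp [pvLcpN, hxy], hxy⟩

-- fold-min characterization (generic)
theorem pvFoldMin_le_init {α : Type} (l : List α) (f : α → Nat) (n : Nat) :
    l.foldl (fun a x => min a (f x)) n ≤ n := by
  induction l generalizing n with
  | nil => simp
  | cons x xs ih =>
    simp only [List.foldl_cons]
    exact le_trans (ih _) (by omega)

theorem pvFoldMin_le_mem {α : Type} (l : List α) (f : α → Nat) (n : Nat)
    (x : α) (hx : x ∈ l) : l.foldl (fun a y => min a (f y)) n ≤ f x := by
  induction l generalizing n with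
  | nil => simp at hx
  | cons z zs ih =>
    simp only [List.foldl_cons]
    rcases List.mem_cons.mp hx with h | h
    · subst h
      exact le_trans (pvFoldMin_le_init _ _ _) (by omega)
    · exact ih _ h

theorem pvFoldMin_cases {α : Type} (l : List α) (f : α → Nat) (n : Nat) :
    l.foldl (fun a x => min a (f x)) n = n ∨
      ∃ x ∈ l, l.foldl (fun a y => min a (f y)) n = f x := by
  induction l generalizing n with
  | nil => left; simp
  | cons z zs ih =>
    simp only [List.foldl_cons]
    rcases ih (min n (f z)) with h | ⟨x, hx, h⟩
    · by_cases hzn : n ≤ f z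
      · left; rw [h]; omega
      · right; exact ⟨z, by simp, by rw [h]; omega⟩
    · right; exact ⟨x, by simp [hx], h⟩

-- abstract comparison over lists of char lists
def pvChk (cs0 : List Char) (css : List (List Char)) (j : Nat) : Option Bool :=
  match css with
  | [] => some true
  | cs :: rest =>
    match cs0[j]?, cs[j]?, pvChk cs0 rest j with
    | some a, some b, some r => some ((a == b) && r)
    | _, _, _ => none

theorem pvChk_eq (cs0 : List Char) (css : List (List Char)) (j : Nat) (c : Char)
    (h0 : cs0[j]? = some c) (hdef : ∀ cs ∈ css, (cs[j]?).isSome) :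
    pvChk cs0 css j = some (css.all (fun cs => cs[j]? == some c)) := by
  induction css with
  | nil => simp [pvChk]
  | cons cs rest ih =>
    have hcs : (cs[j]?).isSome := hdef cs (by simp)
    obtain ⟨d, hd⟩ := Option.isSome_iff_exists.mp hcs
    have hrest := ih (fun x hx => hdef x (by simp [hx]))
    simp only [pvChk, h0, hd, hrest, List.all_cons]
    congr 1
    have hsymm : (c == d) = (d == c) := by
      by_cases h : c = d
      · simp [h]
      · rw [beq_eq_false_iff_ne.mpr h, beq_eq_false_iff_ne.mpr (Ne.symm h)]
    have hopt : (some d == some c) = (d == c) := by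
      by_cases h : d = c <;> simp [h]
    rw [hopt, hsymm]

-- core: under "no member is a prefix of all members", the fold-min M of lcp lengths satisfies:
-- every member is longer than M, the check is true below M and false at M
theorem pvCore (cs0 : List Char) (css : List (List Char)) (h0 : cs0 ∈ css)
    (hnp : ¬ ∃ cs ∈ css, ∀ ds ∈ css, cs <+: ds) :
    (∀ cs ∈ css, css.foldl (fun a x => min a (pvLcpN cs0 x)) cs0.length < cs.length) ∧
    (∀ j < css.foldl (fun a x => min a (pvLcpN cs0 x)) cs0.length,
        pvChk cs0 css j = some true) ∧
    pvChk cs0 css (css.foldl (fun a x => min a (pvLcpN cs0 x)) cs0.length) = some false := by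
  set M := css.foldl (fun a x => min a (pvLcpN cs0 x)) cs0.length with hM
  have hle : ∀ cs ∈ css, M ≤ pvLcpN cs0 cs := fun cs hcs => pvFoldMin_le_mem _ _ _ _ hcs
  have c1 : ∀ cs ∈ css, M < cs.length := by
    intro cs hcs
    by_contra hlen
    rw [not_lt] at hlen
    have h1 : pvLcpN cs0 cs ≤ cs.length := pvLcpN_le_right _ _
    have h2 : M ≤ pvLcpN cs0 cs := hle cs hcs
    have heq : pvLcpN cs0 cs = cs.length := by omega
    have hMeq : M = cs.length := by omega
    apply hnp
    refine ⟨cs, hcs, fun ds hds => ?_⟩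
    have h3 : M ≤ pvLcpN cs0 ds := hle ds hds
    have h4 : cs0.take M = ds.take M := pvLcpN_take _ _ _ h3
    have h5 : cs0.take cs.length = cs := by
      have := pvLcpN_take cs0 cs cs.length (le_of_eq heq.symm)
      simpa using this
    have h6 : cs = ds.take M := by rw [← hMeq] at h5; rw [← h5, h4]
    exact h6 ▸ List.take_prefix _ _
  refine ⟨c1, ?_, ?_⟩
  · intro j hj
    have hc0 : ∃ c, cs0[j]? = some c := by
      have : j < cs0.length := lt_of_lt_of_le hj (le_trans (hle cs0 h0) (pvLcpN_le_left _ _))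
      exact ⟨cs0[j], List.getElem?_eq_getElem this⟩
    obtain ⟨c, hc⟩ := hc0
    have hdef : ∀ cs ∈ css, (cs[j]?).isSome := by
      intro cs hcs
      obtain ⟨d, h1, h2⟩ := pvLcpN_lt cs0 cs j (lt_of_lt_of_le hj (hle cs hcs))
      simp [h2]
    rw [pvChk_eq cs0 css j c hc hdef]
    congr 1
    rw [List.all_eq_true]
    intro cs hcs
    obtain ⟨d, h1, h2⟩ := pvLcpN_lt cs0 cs j (lt_of_lt_of_le hj (hle cs hcs))
    rw [h1] at hc
    simp [h2, ← hc]
  · have hM0 : M < cs0.length := c1 cs0 h0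
    have hc0 : cs0[M]? = some cs0[M] := List.getElem?_eq_getElem hM0
    have hdef : ∀ cs ∈ css, (cs[M]?).isSome := by
      intro cs hcs
      have := c1 cs hcs
      simp [List.getElem?_eq_getElem this]
    rw [pvChk_eq cs0 css M cs0[M] hc0 hdef]
    congr 1
    rcases pvFoldMin_cases css (fun x => pvLcpN cs0 x) cs0.length with h | ⟨cs, hcs, h⟩
    · omega
    · rw [List.all_eq_false]
      have hMl : M = pvLcpN cs0 cs := by rw [hM, h]
      obtain ⟨c, d, h1, h2, h3⟩ := pvLcpN_ne cs0 cs (hMl ▸ hM0) (hMl ▸ c1 cs hcs)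
      refine ⟨cs, hcs, ?_⟩
      rw [← hMl] at h1 h2
      have hcc : cs0[M] = c := by
        have h4 := h1.symm.trans hc0
        exact (Option.some_inj.mp h4).symm
      simp only [h2, hcc]
      simp only [beq_iff_eq, Option.some_inj]
      exact fun hh => h3 hh.symm

-- bridges between A's pvCmpAll (Int index on String) and pvChk (Nat index on List Char)
theorem pvBridgeL (p0 : String) (paths : List String) (j : Nat) :
    pvCmpAll p0 paths (j : Int) = pvChk p0.toList (paths.map String.toList) j := by
  induction paths with
  | nil => simp [pvCmpAll, pvChk]
  | cons p rest ih => simp [pvCmpAll, pvChk, ih]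

theorem pvGetNegRev (xs : List Char) (k : Nat) (hk : 1 ≤ k) :
    PySem.List.pyGet? xs (-(k : Int)) = xs.reverse[k-1]? := by
  by_cases hlen : k ≤ xs.length
  · rw [PySem.List.pyGet?_neg_natCast xs k (by omega) hlen]
    rw [List.getElem?_reverse (by omega)]
    congr 1
    omega
  · have h1 : PySem.List.pyGet? xs (-(k : Int)) = none := by
      rw [PySem.List.pyGet?_eq_none_iff]
      unfold PySem.Raise.InRange
      omega
    have h2 : xs.reverse[k-1]? = none := by
      rw [List.getElem?_eq_none]
      simp
      omega
    rw [h1, h2]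

theorem pvBridgeR (p0 : String) (paths : List String) (k : Nat) (hk : 1 ≤ k) :
    pvCmpAll p0 paths (-(k : Int)) =
      pvChk p0.toList.reverse (paths.map (fun p => p.toList.reverse)) (k - 1) := by
  induction paths with
  | nil => simp [pvCmpAll, pvChk]
  | cons p rest ih =>
    simp only [pvCmpAll, pvChk, List.map_cons, ih]
    rw [show PySem.Str.pyGet? p0 (-(k:Int)) = PySem.List.pyGet? p0.toList (-(k:Int)) from by
          simp [PySem.Str.pyGet?],
        show PySem.Str.pyGet? p (-(k:Int)) = PySem.List.pyGet? p.toList (-(k:Int)) from by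
          simp [PySem.Str.pyGet?],
        pvGetNegRev p0.toList k hk, pvGetNegRev p.toList k hk]

-- loop unrollings
theorem pvLeftA_run (p0 : String) (paths : List String) (M : Nat)
    (ht : ∀ j : Nat, j < M → pvCmpAll p0 paths (j : Int) = some true)
    (hf : pvCmpAll p0 paths (M : Int) = some false) :
    ∀ fuel (j : Nat), j ≤ M → M - j < fuel →
      pvLeftA p0 paths fuel (j : Int) = some (M : Int) := by
  intro fuel
  induction fuel with
  | zero => intro j _ h; omega
  | succ f ih =>
    intro j hj hfuel
    by_cases hjM : j = M
    · subst hjM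
      simp [pvLeftA, hf]
    · have hlt : j < M := by omega
      have h1 : pvCmpAll p0 paths (j : Int) = some true := ht j hlt
      simp only [pvLeftA, h1]
      have : ((j : Int) + 1) = ((j + 1 : Nat) : Int) := by push_cast; ring
      rw [this]
      exact ih (j + 1) (by omega) (by omega)

theorem pvRightA_run (p0 : String) (paths : List String) (M : Nat)
    (ht : ∀ k : Nat, 1 ≤ k → k ≤ M → pvCmpAll p0 paths (-(k : Int)) = some true)
    (hf : pvCmpAll p0 paths (-((M + 1 : Nat) : Int)) = some false) :
    ∀ fuel (k : Nat), 1 ≤ k → k ≤ M + 1 → (M + 1) - k < fuel →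
      pvRightA p0 paths fuel (-(k : Int)) = some (-((M : Int) + 1)) := by
  intro fuel
  induction fuel with
  | zero => intro k _ _ h; omega
  | succ f ih =>
    intro k hk1 hkM hfuel
    by_cases hkeq : k = M + 1
    · subst hkeq
      have : pvCmpAll p0 paths (-((M + 1 : Nat) : Int)) = some false := hf
      simp only [pvRightA, this]
      exact congrArg some (by push_cast; ring)
    · have hlt : k ≤ M := by omega
      have h1 : pvCmpAll p0 paths (-(k : Int)) = some true := ht k hk1 hlt
      simp only [pvRightA, h1]
      have : (-(k : Int) - 1) = -(((k + 1 : Nat) : Int)) := by push_cast; ring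
      rw [this]
      exact ih (k + 1) (by omega) (by omega) (by omega)

-- B's fold over an Int pair equals the pair of Nat fold-mins
theorem pvBFoldCast (first : String) (l : List String) (x y : Nat) :
    l.foldl
        (fun (lr : Int × Int) p =>
          (min lr.1 ((pvLcpN first.toList p.toList : Nat) : Int),
           min lr.2 ((pvLcpN first.toList.reverse p.toList.reverse : Nat) : Int)))
        ((x : Int), (y : Int)) =
      (((l.foldl (fun a p => min a (pvLcpN first.toList p.toList)) x : Nat) : Int),
       ((l.foldl (fun a p => min a (pvLcpN first.toList.reverse p.toList.reverse)) y : Nat) : Int)) := by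
  induction l generalizing x y with
  | nil => simp
  | cons p rest ih =>
    simp only [List.foldl_cons]
    rw [show (min (x : Int) ((pvLcpN first.toList p.toList : Nat) : Int)) =
          ((min x (pvLcpN first.toList p.toList) : Nat) : Int) from by push_cast; rfl,
        show (min (y : Int) ((pvLcpN first.toList.reverse p.toList.reverse : Nat) : Int)) =
          ((min y (pvLcpN first.toList.reverse p.toList.reverse) : Nat) : Int) from by push_cast; rfl]
    exact ih _ _

theorem pvBFold (first : String) (l : List String) (x y : Nat) :
    l.foldl
        (fun (lr : Int × Int) p =>
          (min lr.1 (pvLcp first.toList p.toList),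
           min lr.2 (pvLcp first.toList.reverse p.toList.reverse)))
        ((x : Int), (y : Int)) =
      (((l.foldl (fun a p => min a (pvLcpN first.toList p.toList)) x : Nat) : Int),
       ((l.foldl (fun a p => min a (pvLcpN first.toList.reverse p.toList.reverse)) y : Nat) : Int)) := by
  have hfun : (fun (lr : Int × Int) (p : String) =>
        (min lr.1 (pvLcp first.toList p.toList),
         min lr.2 (pvLcp first.toList.reverse p.toList.reverse))) =
      (fun (lr : Int × Int) (p : String) =>
        (min lr.1 ((pvLcpN first.toList p.toList : Nat) : Int),
         min lr.2 ((pvLcpN first.toList.reverse p.toList.reverse : Nat) : Int))) := by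
    funext lr p
    rw [pvLcp_eq_cast, pvLcp_eq_cast]
  rw [hfun]
  exact pvBFoldCast first l x y

-- ===== VERDICT (by name: the statement is the Claim_ definition above) =====
theorem get_key_idx_spec : Claim_equal_get_key_idx := by
  intro paths _ hpre
  unfold Spec_get_key_idx
  by_cases hlen : paths.length ≤ 1
  · unfold get_key_idx get_key_idx_alt
    rw [if_pos hlen, if_pos hlen]
  · obtain ⟨p, rest, rfl⟩ : ∃ p rest, paths = p :: rest := by
      cases paths with
      | nil => simp at hlen
      | cons p rest => exact ⟨p, rest, rfl⟩
    rcases hpre with h | ⟨hnp, hns⟩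
    · exact absurd h hlen
    have hnp' : ¬ ∃ cs ∈ (p :: rest).map String.toList,
        ∀ ds ∈ (p :: rest).map String.toList, cs <+: ds := by
      rintro ⟨cs, hcs, hall⟩
      obtain ⟨q, hq, rfl⟩ := List.mem_map.mp hcs
      exact hnp ⟨q, hq, fun r hr =>
        List.isPrefixOf_iff_prefix.mpr (hall r.toList (List.mem_map.mpr ⟨r, hr, rfl⟩))⟩
    have hns' : ¬ ∃ cs ∈ (p :: rest).map (fun q => q.toList.reverse),
        ∀ ds ∈ (p :: rest).map (fun q => q.toList.reverse), cs <+: ds := by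
      rintro ⟨cs, hcs, hall⟩
      obtain ⟨q, hq, rfl⟩ := List.mem_map.mp hcs
      refine hns ⟨q, hq, fun r hr => ?_⟩
      have h1 := hall r.toList.reverse (List.mem_map.mpr ⟨r, hr, rfl⟩)
      exact List.isSuffixOf_iff_suffix.mpr (List.reverse_prefix.mp h1)
    have hmem : p.toList ∈ (p :: rest).map String.toList := by simp
    obtain ⟨c1, c2, c3⟩ := pvCore p.toList ((p :: rest).map String.toList) hmem hnp'
    have hmemR : p.toList.reverse ∈ (p :: rest).map (fun q => q.toList.reverse) := by simp
    obtain ⟨d1, d2, d3⟩ :=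
      pvCore p.toList.reverse ((p :: rest).map (fun q => q.toList.reverse)) hmemR hns'
    set ML := ((p :: rest).map String.toList).foldl
        (fun a x => min a (pvLcpN p.toList x)) p.toList.length with hML
    set MR := ((p :: rest).map (fun q => q.toList.reverse)).foldl
        (fun a x => min a (pvLcpN p.toList.reverse x)) p.toList.reverse.length with hMR
    have hMLlt : ML < p.toList.length := c1 p.toList hmem
    have hMRlt : MR < p.toList.length := by
      have := d1 p.toList.reverse hmemR
      simpa using this
    -- run A's left loop
    have hrunL := pvLeftA_run p (p :: rest) ML
      (fun j hj => by rw [pvBridgeL]; exact c2 j hj)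
      (by rw [pvBridgeL]; exact c3)
      (p.toList.length + 1) 0 (by omega) (by omega)
    -- run A's right loop
    have htR : ∀ k : Nat, 1 ≤ k → k ≤ MR →
        pvCmpAll p (p :: rest) (-(k : Int)) = some true := by
      intro k hk1 hk2
      rw [pvBridgeR p (p :: rest) k hk1]
      exact d2 (k - 1) (by omega)
    have hfR : pvCmpAll p (p :: rest) (-((MR + 1 : Nat) : Int)) = some false := by
      rw [pvBridgeR p (p :: rest) (MR + 1) (by omega)]
      have hmr : MR + 1 - 1 = MR := by omega
      rw [hmr]
      exact d3
    have hrunR := pvRightA_run p (p :: rest) MR htR hfR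
      (p.toList.length + 1) 1 (by omega) (by omega) (by omega)
    rw [show (((0 : Nat)) : Int) = 0 from by norm_num] at hrunL
    rw [show (-(((1 : Nat)) : Int)) = -1 from by norm_num] at hrunR
    -- A's value
    have hA : get_key_idx (p :: rest) = ((ML : Int), some (-((MR : Int) + 1) + 1)) := by
      unfold get_key_idx
      rw [if_neg hlen]
      simp only [List.headD_cons]
      rw [hrunL, hrunR]
    -- B's value
    have hNL : ML = rest.foldl (fun a q => min a (pvLcpN p.toList q.toList)) p.toList.length := by
      rw [hML, List.foldl_map]
      simp only [List.foldl_cons, pvLcpN_self, min_self]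
    have hNR : MR = rest.foldl
        (fun a q => min a (pvLcpN p.toList.reverse q.toList.reverse)) p.toList.length := by
      rw [hMR, List.foldl_map]
      simp only [List.foldl_cons, pvLcpN_self, min_self, List.length_reverse]
    have hB : get_key_idx_alt (p :: rest) = ((ML : Int), some (-(MR : Int))) := by
      unfold get_key_idx_alt
      rw [if_neg hlen]
      simp only [List.headD_cons, List.tail_cons]
      rw [show PySem.Str.len p = ((p.toList.length : Nat) : Int) from by simp [PySem.Str.len_eq]]
      rw [pvBFold p rest p.toList.length p.toList.length]
      rw [← hNL, ← hNR]
    rw [hA, hB]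
    congr 1
    congr 1
    omega
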